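-- pv_equiv track=rewrite | github.com/rt-jmoors/project_euler | 18/triangle_modules.py | make_triangle
-- ===== SOURCE A (Python) =====
-- def make_triangle(numbers):
--     """Takes a list of numbers, and returns a continuously growing triangle"""
--
--     row_count = 1
--     start_index = 0
--     i = 1
--     triangle = []
--     while start_index < len(numbers):
--         end_index = start_index + i
--         triangle.append(numbers[start_index:end_index])
--         start_index = end_index
--         i += 1
--     return triangle
-- ===== SOURCE B (Python) =====
-- def make_triangle(numbers):
--     """Takes a list of numbers, and returns a continuously growing triangle"""
--     triangle = []
--     current = []
--     target = 1
--     for x in numbers: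
--         current.append(x)
--         if len(current) == target:
--             triangle.append(current)
--             current = []
--             target += 1
--     if current:
--         triangle.append(current)
--     return triangle
-- ===== Notes on version B (the rewrite author's own statement) =====
-- stated objective: alternative
-- what changed: Replaced the while-loop that repeatedly slices the list by growing index windows with a single element-by-element pass that fills a current row up to a growing target length.
import Mathlib
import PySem

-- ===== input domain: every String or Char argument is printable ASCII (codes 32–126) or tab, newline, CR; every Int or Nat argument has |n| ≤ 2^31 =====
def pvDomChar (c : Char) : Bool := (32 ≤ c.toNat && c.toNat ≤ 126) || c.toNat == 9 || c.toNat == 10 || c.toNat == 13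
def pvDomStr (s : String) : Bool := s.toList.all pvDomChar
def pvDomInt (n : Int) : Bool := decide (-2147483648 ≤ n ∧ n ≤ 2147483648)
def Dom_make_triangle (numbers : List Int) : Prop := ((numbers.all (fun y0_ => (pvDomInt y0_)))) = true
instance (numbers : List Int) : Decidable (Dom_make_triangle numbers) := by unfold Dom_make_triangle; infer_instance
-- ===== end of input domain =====

-- B differs from A by a single element-by-element pass (current row + growing target) instead of repeated growing slices; alternative decomposition, same cost.

-- ===== PORT A =====
-- A's while loop: start_index, i, triangle; each step appends numbers[start_index:start_index+i].
def make_triangle_loop (numbers : List Int) (start_index i : Nat) (hi : 1 ≤ i)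
    (triangle : List (List Int)) : List (List Int) :=
  if h : start_index < numbers.length then
    make_triangle_loop numbers (start_index + i) (i + 1) (by omega)
      (triangle ++ [PySem.List.slice numbers (some (start_index : Int)) (some ((start_index : Int) + (i : Int)))])
  else triangle
termination_by numbers.length - start_index
decreasing_by omega

def make_triangle (numbers : List Int) : List (List Int) :=
  make_triangle_loop numbers 0 1 (by omega) []

-- ===== PORT B =====
-- B's for loop state: (triangle, current, target)
def make_triangle_alt_step (st : List (List Int) × List Int × Nat) (x : Int) :
    List (List Int) × List Int × Nat :=
  let current := st.2.1 ++ [x]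
  if current.length = st.2.2 then (st.1 ++ [current], [], st.2.2 + 1)
  else (st.1, current, st.2.2)

def make_triangle_alt (numbers : List Int) : List (List Int) :=
  let st := numbers.foldl make_triangle_alt_step ([], [], 1)
  if st.2.1 ≠ [] then st.1 ++ [st.2.1] else st.1

-- ===== PRECONDITION & SPEC =====
def Spec_make_triangle (numbers : List Int) (out : List (List Int)) : Prop := out = make_triangle_alt numbers
instance (numbers : List Int) (out : List (List Int)) : Decidable (Spec_make_triangle numbers out) := by unfold Spec_make_triangle; infer_instance

-- ===== CLAIM (what is proved, stated in full; the proofs are below) =====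
def Claim_equal_make_triangle : Prop := ∀ (numbers : List Int), Dom_make_triangle numbers → Spec_make_triangle numbers (make_triangle numbers)

-- ===== LEMMAS AND PROOFS =====

-- common reference: chunk l k = rows of sizes k+1, k+2, … carved off the front of l
def chunk : List Int → Nat → List (List Int)
  | [], _ => []
  | x :: xs, k => (x :: xs).take (k + 1) :: chunk ((x :: xs).drop (k + 1)) (k + 1)
termination_by l _ => l.length
decreasing_by simp

theorem chunk_nil (k : Nat) : chunk [] k = [] := by simp [chunk]

theorem chunk_of_ne_nil (l : List Int) (k : Nat) (h : l ≠ []) :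
    chunk l k = l.take (k + 1) :: chunk (l.drop (k + 1)) (k + 1) := by
  cases l with
  | nil => exact absurd rfl h
  | cons x xs => simp [chunk]

-- A's loop computes the chunks of the untouched suffix
theorem make_triangle_loop_eq (numbers : List Int) :
    ∀ (fuel start_index k : Nat) (triangle : List (List Int)),
      numbers.length - start_index ≤ fuel →
      make_triangle_loop numbers start_index (k + 1) (by omega) triangle
        = triangle ++ chunk (numbers.drop start_index) k := by
  intro fuel
  induction fuel with
  | zero =>
    intro start_index k triangle hf
    rw [make_triangle_loop]
    have h : ¬ start_index < numbers.length := by omega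
    have hd : numbers.drop start_index = [] := List.drop_eq_nil_of_le (by omega)
    simp [h, hd, chunk_nil]
  | succ n ih =>
    intro start_index k triangle hf
    rw [make_triangle_loop]
    by_cases h : start_index < numbers.length
    · simp only [h, dif_pos]
      rw [ih (start_index + (k + 1)) (k + 1) _ (by omega)]
      have hs : PySem.List.slice numbers (some (start_index : Int))
          (some ((start_index : Int) + ((k + 1 : Nat) : Int)))
          = (numbers.drop start_index).take (k + 1) := by
        have := PySem.List.slice_natCast_add numbers start_index (k + 1)
        simpa using this
      have hdrop : numbers.drop (start_index + (k + 1)) = (numbers.drop start_index).drop (k + 1) := by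
        rw [List.drop_drop]
      have hne : numbers.drop start_index ≠ [] := by
        intro hc
        have := List.drop_eq_nil_iff.mp hc
        omega
      rw [chunk_of_ne_nil _ k hne]
      simp only [hs, hdrop]
      simp
    · simp only [h, dif_neg, not_false_iff]
      have hd : numbers.drop start_index = [] := List.drop_eq_nil_of_le (by omega)
      simp [hd, chunk_nil]

-- B's fold, written recursively
def bLoop : List Int → List Int → Nat → List (List Int)
  | [], cur, _ => if cur ≠ [] then [cur] else []
  | x :: xs, cur, target =>
    if (cur ++ [x]).length = target then (cur ++ [x]) :: bLoop xs [] (target + 1)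
    else bLoop xs (cur ++ [x]) target

theorem foldl_eq_bLoop : ∀ (l cur : List Int) (target : Nat) (acc : List (List Int)),
    (if (l.foldl make_triangle_alt_step (acc, cur, target)).2.1 ≠ [] then
        (l.foldl make_triangle_alt_step (acc, cur, target)).1
          ++ [(l.foldl make_triangle_alt_step (acc, cur, target)).2.1]
      else (l.foldl make_triangle_alt_step (acc, cur, target)).1)
      = acc ++ bLoop l cur target := by
  intro l
  induction l with
  | nil => intro cur target acc; simp only [List.foldl_nil, bLoop]; split_ifs <;> simp
  | cons x xs ih =>
    intro cur target acc
    simp only [List.foldl_cons]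
    by_cases h : (cur ++ [x]).length = target
    · rw [show make_triangle_alt_step (acc, cur, target) x = (acc ++ [cur ++ [x]], [], target + 1)
        by simp [make_triangle_alt_step, h]]
      rw [ih [] (target + 1) (acc ++ [cur ++ [x]])]
      simp [bLoop, h]
    · have h' : ¬ (cur.length + 1 = target) := by simpa using h
      rw [show make_triangle_alt_step (acc, cur, target) x = (acc, cur ++ [x], target)
        by simp [make_triangle_alt_step, h']]
      rw [ih (cur ++ [x]) target acc]
      simp [bLoop, h']

-- B's loop with a partially filled current row computes the chunks of cur ++ rest
theorem bLoop_eq_chunk : ∀ (rest cur : List Int) (k : Nat), cur.length ≤ k →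
    bLoop rest cur (k + 1) = chunk (cur ++ rest) k := by
  intro rest
  induction rest with
  | nil =>
    intro cur k hk
    simp only [bLoop, List.append_nil]
    by_cases h : cur = []
    · simp [h, chunk_nil]
    · rw [chunk_of_ne_nil _ k h]
      have h1 : cur.take (k + 1) = cur := List.take_of_length_le (by omega)
      have h2 : cur.drop (k + 1) = [] := List.drop_eq_nil_of_le (by omega)
      simp [h, h1, h2, chunk_nil]
  | cons x xs ih =>
    intro cur k hk
    simp only [bLoop]
    by_cases h : (cur ++ [x]).length = k + 1
    · simp only [h, if_pos]
      rw [ih [] (k + 1) (by simp)]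
      rw [show cur ++ x :: xs = (cur ++ [x]) ++ xs by simp]
      rw [chunk_of_ne_nil _ k (by simp)]
      have h1 : ((cur ++ [x]) ++ xs).take (k + 1) = cur ++ [x] := by
        rw [← h, List.take_left]
      have h2 : ((cur ++ [x]) ++ xs).drop (k + 1) = xs := by
        rw [← h, List.drop_left]
      rw [h1, h2]
      simp
    · simp only [h, if_neg, not_false_iff]
      have hlt : (cur ++ [x]).length ≤ k := by
        simp at h ⊢; omega
      rw [ih (cur ++ [x]) k hlt]
      simp

theorem make_triangle_eq_chunk (numbers : List Int) : make_triangle numbers = chunk numbers 0 := by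
  unfold make_triangle
  have := make_triangle_loop_eq numbers numbers.length 0 0 []
  simpa using this (by omega)

theorem make_triangle_alt_eq_chunk (numbers : List Int) :
    make_triangle_alt numbers = chunk numbers 0 := by
  unfold make_triangle_alt
  simp only []
  rw [foldl_eq_bLoop numbers [] 1 []]
  have := bLoop_eq_chunk numbers [] 0 (by simp)
  simpa using this

-- ===== VERDICT (by name: the statement is the Claim_ definition above) =====
theorem make_triangle_spec : Claim_equal_make_triangle := by
  intro numbers _
  unfold Spec_make_triangle
  rw [make_triangle_eq_chunk, make_triangle_alt_eq_chunk]
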